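-- pv_equiv track=rewrite | github.com/zapatos24/mod_4_project | narrow_zips.py | compare_top_zipcodes
-- ===== SOURCE A (Python) =====
-- def compare_top_zipcodes(top_zipcodes):
--     top_states = set()
--     for curr_zipcode in top_zipcodes:
--         top_states.add(curr_zipcode[2])
--
--     already_used = dict(zip(top_states, [False for _ in range(len(top_states))]))
--     zipcodes_to_model = []
--     #  ensures only 1 zipcode per state
--     for curr_zipcode in top_zipcodes:
--         state = curr_zipcode[2]
--         if not already_used[state]:
--             zipcodes_to_model.append(curr_zipcode)
--             already_used[state] = True
--     return zipcodes_to_model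
-- ===== SOURCE B (Python) =====
-- def compare_top_zipcodes(top_zipcodes):
--     # keep row i exactly when no earlier row has the same state: a stateless
--     # prefix-scan filter, no seen-set/dict maintained at all
--     return [z for i, z in enumerate(top_zipcodes)
--             if all(w[2] != z[2] for w in top_zipcodes[:i])]
-- ===== Notes on version B (the rewrite author's own statement) =====
-- stated objective: simpler
-- what changed: Replaces A's two stateful passes (state set, bool 'already_used' dict, result list) with one stateless comprehension that keeps row i iff its state does not occur in the prefix top_zipcodes[:i]; no auxiliary structure is maintained.
import Mathlib
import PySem

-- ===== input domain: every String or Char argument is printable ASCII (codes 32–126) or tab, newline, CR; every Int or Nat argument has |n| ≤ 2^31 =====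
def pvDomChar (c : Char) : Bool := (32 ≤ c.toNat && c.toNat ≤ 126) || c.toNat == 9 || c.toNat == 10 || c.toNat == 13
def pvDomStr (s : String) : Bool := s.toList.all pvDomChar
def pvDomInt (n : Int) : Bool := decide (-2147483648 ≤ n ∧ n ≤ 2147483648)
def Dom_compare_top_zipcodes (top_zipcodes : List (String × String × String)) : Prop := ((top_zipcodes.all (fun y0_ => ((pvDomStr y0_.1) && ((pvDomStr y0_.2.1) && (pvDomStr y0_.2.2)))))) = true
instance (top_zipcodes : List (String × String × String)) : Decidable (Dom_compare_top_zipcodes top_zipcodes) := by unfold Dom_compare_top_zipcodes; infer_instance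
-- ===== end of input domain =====

-- B replaces A's stateful set+dict+list passes with one stateless prefix-scan filter (keep row i iff its state is absent from the prefix); simpler, O(n^2) vs O(n).


-- ===== PORT A =====
-- A's second loop step: append curr_zipcode and mark the state unless already_used[state]
def pvStepA (p : PySem.Dict String Bool × List (String × String × String))
    (z : String × String × String) : PySem.Dict String Bool × List (String × String × String) :=
  let state := z.2.2
  if p.1.getD state false then p else (p.1.insert state true, p.2 ++ [z])

def compare_top_zipcodes (top_zipcodes : List (String × String × String)) : List (String × String × String) :=
  let top_states : PySem.Set String :=
    top_zipcodes.foldl (fun s z => PySem.Set.add s z.2.2) PySem.Set.empty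
  -- dict(zip(top_states, [False]*len(top_states))): every state maps to False (set iteration
  -- order affects only key order, never any getD result, so this is exact for A's lookups)
  let already_used : PySem.Dict String Bool :=
    top_states.foldl (fun d st => d.insert st false) PySem.Dict.empty
  (top_zipcodes.foldl pvStepA (already_used, ([] : List (String × String × String)))).2

-- ===== PORT B =====
-- Source B's comprehension: filter enumerate(tz) by 'all(w[2] != z[2] for w in tz[:i])', keep the rows
def compare_top_zipcodes_alt (top_zipcodes : List (String × String × String)) : List (String × String × String) :=
  ((PySem.List.enumerate top_zipcodes 0).filter
      (fun p => (PySem.List.slice top_zipcodes none (some p.1)).all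
        (fun w => w.2.2 != p.2.2.2))).map (·.2)

-- ===== PRECONDITION & SPEC =====
def Spec_compare_top_zipcodes (top_zipcodes : List (String × String × String)) (out : List (String × String × String)) : Prop := out = compare_top_zipcodes_alt top_zipcodes
instance (top_zipcodes : List (String × String × String)) (out : List (String × String × String)) : Decidable (Spec_compare_top_zipcodes top_zipcodes out) := by unfold Spec_compare_top_zipcodes; infer_instance

-- ===== CLAIM =====
def Claim_equal_compare_top_zipcodes : Prop := ∀ (top_zipcodes : List (String × String × String)), Dom_compare_top_zipcodes top_zipcodes → Spec_compare_top_zipcodes top_zipcodes (compare_top_zipcodes top_zipcodes)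

-- ===== LEMMAS AND PROOFS =====

-- common reference: first row per state, given the states already seen
def pvFirstPer (seen : List String) : List (String × String × String) → List (String × String × String)
  | [] => []
  | z :: r => if z.2.2 ∈ seen then pvFirstPer seen r else z :: pvFirstPer (z.2.2 :: seen) r

-- the already_used dict built by inserting False for every key answers getD _ false = false everywhere
lemma pv_init (states : List String) (d : PySem.Dict String Bool)
    (h : ∀ s, d.getD s false = false) :
    ∀ s, (states.foldl (fun d st => d.insert st false) d).getD s false = false := by
  induction states generalizing d with
  | nil => simpa using h
  | cons st rest ih =>
    intro s
    refine ih _ (fun s' => ?_) s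
    rw [PySem.Dict.getD_insert]
    split <;> simp [h]

-- A-side invariant: if already_used answers exactly 'state ∈ seen', the loop appends pvFirstPer seen
lemma pv_A (tz : List (String × String × String)) (au : PySem.Dict String Bool)
    (acc : List (String × String × String)) (seen : List String)
    (h : ∀ s, au.getD s false = seen.contains s) :
    (tz.foldl pvStepA (au, acc)).2 = acc ++ pvFirstPer seen tz := by
  induction tz generalizing au acc seen with
  | nil => simp [pvFirstPer]
  | cons z rest ih =>
    simp only [List.foldl_cons, pvFirstPer]
    by_cases hc : z.2.2 ∈ seen
    · have hA : pvStepA (au, acc) z = (au, acc) := by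
        simp [pvStepA, h z.2.2, hc]
      rw [hA, if_pos hc]
      exact ih au acc seen h
    · have hA : pvStepA (au, acc) z = (au.insert z.2.2 true, acc ++ [z]) := by
        simp [pvStepA, h z.2.2, hc]
      rw [hA, if_neg hc]
      have hinv : ∀ s, (au.insert z.2.2 true).getD s false = (z.2.2 :: seen).contains s := by
        intro s
        rw [PySem.Dict.getD_insert]
        by_cases hs : s = z.2.2 <;> simp [hs, h s]
      rw [ih _ _ _ hinv]
      simp
-- pvFirstPer depends on seen only through membership
lemma pv_seen_perm (l : List (String × String × String)) (s1 s2 : List String)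
    (h : ∀ s, s ∈ s1 ↔ s ∈ s2) : pvFirstPer s1 l = pvFirstPer s2 l := by
  induction l generalizing s1 s2 with
  | nil => rfl
  | cons z r ih =>
    simp only [pvFirstPer]
    by_cases hm : z.2.2 ∈ s1
    · rw [if_pos hm, if_pos ((h _).mp hm)]; exact ih s1 s2 h
    · rw [if_neg hm, if_neg (fun hx => hm ((h _).mpr hx))]
      exact congrArg _ (ih _ _ (by intro s; simp [h s]))

-- B-side: the prefix-scan filter with offset pre.length over pre ++ l computes pvFirstPer (states of pre)
lemma pv_B (l pre : List (String × String × String)) :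
    ((PySem.List.enumerate l (pre.length : Int)).filter
        (fun p => (PySem.List.slice (pre ++ l) none (some p.1)).all
          (fun w => w.2.2 != p.2.2.2))).map (·.2)
    = pvFirstPer (pre.map (·.2.2)) l := by
  induction l generalizing pre with
  | nil => simp [PySem.List.enumerate, pvFirstPer]
  | cons z r ih =>
    rw [PySem.List.enumerate_cons, List.filter_cons]
    have hsl : PySem.List.slice (pre ++ z :: r) none (some (pre.length : Int)) = pre := by
      rw [PySem.List.slice_to_natCast]; simp
    have hnext : ((pre ++ [z]) ++ r) = pre ++ z :: r := by simp
    have hlen : ((pre.length : Int) + 1) = ((pre ++ [z]).length : Int) := by simp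
    have htail : ((PySem.List.enumerate r ((pre.length : Int) + 1)).filter
        (fun p => (PySem.List.slice (pre ++ z :: r) none (some p.1)).all
          (fun w => w.2.2 != p.2.2.2))).map (·.2)
        = pvFirstPer ((pre ++ [z]).map (·.2.2)) r := by
      rw [hlen, ← hnext]; exact ih (pre ++ [z])
    by_cases hm : z.2.2 ∈ pre.map (·.2.2)
    · have hcond : (PySem.List.slice (pre ++ z :: r) none (some (pre.length : Int))).all
          (fun w => w.2.2 != z.2.2) = false := by
        rw [hsl]
        obtain ⟨w, hw, he⟩ := List.mem_map.mp hm
        refine List.all_eq_false.mpr ⟨w, hw, ?_⟩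
        simp [he]
      rw [hcond, if_neg (by simp), htail, pvFirstPer, if_pos hm]
      refine pv_seen_perm r _ _ ?_
      intro s
      constructor
      · intro hs
        rcases List.mem_map.mp hs with ⟨w, hw, he⟩
        rcases List.mem_append.mp hw with h1 | h1
        · exact he ▸ List.mem_map.mpr ⟨w, h1, rfl⟩
        · have : w = z := List.mem_singleton.mp h1
          exact he ▸ this ▸ hm
      · intro hs
        rcases List.mem_map.mp hs with ⟨w, hw, he⟩
        exact he ▸ List.mem_map.mpr ⟨w, List.mem_append.mpr (Or.inl hw), rfl⟩
    · have hcond : (PySem.List.slice (pre ++ z :: r) none (some (pre.length : Int))).all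
          (fun w => w.2.2 != z.2.2) = true := by
        rw [hsl]
        refine List.all_eq_true.mpr ?_
        intro w hw
        have : w.2.2 ≠ z.2.2 := fun he => hm (he ▸ List.mem_map.mpr ⟨w, hw, rfl⟩)
        simpa using this
      rw [hcond, if_pos rfl, List.map_cons, htail, pvFirstPer, if_neg hm]
      refine congrArg _ (pv_seen_perm r _ _ ?_)
      intro s
      simp
      exact or_comm

-- ===== VERDICT =====
theorem compare_top_zipcodes_spec : Claim_equal_compare_top_zipcodes := by
  intro tz _
  unfold Spec_compare_top_zipcodes compare_top_zipcodes compare_top_zipcodes_alt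
  have h : ∀ s, ((tz.foldl (fun s z => PySem.Set.add s z.2.2) PySem.Set.empty).foldl
      (fun d st => d.insert st false) PySem.Dict.empty).getD s false
      = ([] : List String).contains s := by
    intro s
    exact pv_init _ _ (fun s' => PySem.Dict.getD_empty s' false) s
  rw [pv_A tz _ [] [] h]
  have := pv_B tz []
  simpa using this.symm
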